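-- pv_equiv track=rewrite | github.com/huderlem/linoone | generators/types.py | create_type_moves_map
-- ===== SOURCE A (Python) =====
-- def create_type_moves_map(type_names, moves, move_names):
--     """
--     Create a convenient type mapping with all the moves that
--     have each typing.
--     """
--     type_moves_map = {}
--     for move in moves:
--         move_type = moves[move]["type"]
--         if move_type not in type_moves_map:
--             type_moves_map[move_type] = []
--
--         type_moves_map[move_type].append(move)
--
--     for move in type_moves_map:
--         type_moves_map[move] = sorted(type_moves_map[move], key=lambda m: move_names[m])
--
--     return type_moves_map
-- ===== SOURCE B (Python) =====
-- def create_type_moves_map(type_names, moves, move_names):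
--     """
--     Create a convenient type mapping with all the moves that
--     have each typing.
--     """
--     # First pass fixes the dict's key order to first-encounter order.
--     type_moves_map = {}
--     for move in moves:
--         type_moves_map.setdefault(moves[move]["type"], [])
--     # One global stable sort by name; buckets then come out already sorted.
--     for move in sorted(moves, key=lambda m: move_names[m]):
--         type_moves_map[moves[move]["type"]].append(move)
--     return type_moves_map
-- ===== Notes on version B (the rewrite author's own statement) =====
-- stated objective: alternative
-- what changed: Instead of grouping moves by type and then sorting each bucket by name, B fixes the key order with one short setdefault pass and then performs a single global stable sort of all moves by name, appending each move to its type's bucket so no per-bucket sort is needed.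
import Mathlib
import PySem

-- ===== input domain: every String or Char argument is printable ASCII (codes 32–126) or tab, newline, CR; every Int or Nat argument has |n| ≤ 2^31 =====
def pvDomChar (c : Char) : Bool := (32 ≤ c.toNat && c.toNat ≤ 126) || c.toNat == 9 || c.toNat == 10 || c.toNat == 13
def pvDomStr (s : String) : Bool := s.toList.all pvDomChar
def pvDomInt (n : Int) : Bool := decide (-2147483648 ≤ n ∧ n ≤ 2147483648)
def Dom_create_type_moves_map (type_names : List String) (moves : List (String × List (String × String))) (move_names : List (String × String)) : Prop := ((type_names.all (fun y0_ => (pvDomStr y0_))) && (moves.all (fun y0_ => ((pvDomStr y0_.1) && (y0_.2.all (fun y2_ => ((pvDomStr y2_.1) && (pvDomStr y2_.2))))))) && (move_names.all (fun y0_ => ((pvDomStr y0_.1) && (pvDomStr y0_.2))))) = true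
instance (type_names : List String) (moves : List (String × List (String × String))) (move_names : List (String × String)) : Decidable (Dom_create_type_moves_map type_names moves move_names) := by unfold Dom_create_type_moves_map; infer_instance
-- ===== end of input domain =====

-- B replaces A's group-then-sort-each-bucket by one global stable sort by name followed by bucketing
-- (key order fixed by a first setdefault pass); an alternative decomposition, same asymptotic cost.

-- ===== PORT A =====
def create_type_moves_map (type_names : List String) (moves : List (String × List (String × String))) (move_names : List (String × String)) : List (String × List String) :=
  let md : PySem.Dict String (List (String × String)) := PySem.Dict.ofList moves
  -- for move in moves: group each move key under its type, first-encounter key order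
  let type_moves_map : PySem.Dict String (List String) :=
    md.items.foldl (fun acc kv =>
      let move_type := (PySem.Dict.ofList kv.2).getD "type" ""
      let acc := if acc.contains move_type then acc else acc.insert move_type []
      acc.modify move_type [] (· ++ [kv.1])) PySem.Dict.empty
  -- for move in type_moves_map: sort each bucket by the move's name
  let type_moves_map2 :=
    type_moves_map.keys.foldl (fun d t =>
      d.insert t (PySem.List.sorted (d.getD t []) (fun m => (PySem.Dict.ofList move_names).getD m "") false)) type_moves_map
  type_moves_map2.items

-- ===== PORT B =====
def create_type_moves_map_alt (type_names : List String) (moves : List (String × List (String × String))) (move_names : List (String × String)) : List (String × List String) :=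
  let md : PySem.Dict String (List (String × String)) := PySem.Dict.ofList moves
  let mnames : PySem.Dict String String := PySem.Dict.ofList move_names
  -- first pass fixes the dict's key order to first-encounter order
  let skeleton : PySem.Dict String (List String) :=
    md.items.foldl (fun acc kv => acc.setdefault ((PySem.Dict.ofList kv.2).getD "type" "") []) PySem.Dict.empty
  -- one global stable sort by name; buckets then come out already sorted
  let ordered := PySem.List.sorted md.keys (fun m => mnames.getD m "") false
  let final := ordered.foldl (fun acc m =>
      acc.modify ((PySem.Dict.ofList (md.getD m [])).getD "type" "") [] (· ++ [m])) skeleton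
  final.items

-- ===== PRECONDITION & SPEC =====
-- Pre_ excludes exactly the inputs on which the Python A raises a KeyError: a move (as the dict
-- actually built from `moves`) whose inner dict has no "type" key, or a move key absent from move_names.
def Pre_create_type_moves_map (type_names : List String) (moves : List (String × List (String × String))) (move_names : List (String × String)) : Prop :=
  ∀ kv ∈ (PySem.Dict.ofList moves).items, "type" ∈ kv.2.map Prod.fst ∧ kv.1 ∈ move_names.map Prod.fst
instance (type_names : List String) (moves : List (String × List (String × String))) (move_names : List (String × String)) : Decidable (Pre_create_type_moves_map type_names moves move_names) := by unfold Pre_create_type_moves_map; infer_instance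

def pvWitness_create_type_moves_map : List String × (List (String × List (String × String))) × (List (String × String)) :=
  (["normal"], [("tackle", [("type", "normal")]), ("ember", [("type", "fire")])], [("tackle", "Tackle"), ("ember", "Ember")])

def Spec_create_type_moves_map (type_names : List String) (moves : List (String × List (String × String))) (move_names : List (String × String)) (out : List (String × List String)) : Prop := out = create_type_moves_map_alt type_names moves move_names
instance (type_names : List String) (moves : List (String × List (String × String))) (move_names : List (String × String)) (out : List (String × List String)) : Decidable (Spec_create_type_moves_map type_names moves move_names out) := by unfold Spec_create_type_moves_map; infer_instance

-- ===== CLAIM (what is proved, stated in full; the proofs are below) =====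
def Claim_equal_create_type_moves_map : Prop := ∀ (type_names : List String) (moves : List (String × List (String × String))) (move_names : List (String × String)), Dom_create_type_moves_map type_names moves move_names → Pre_create_type_moves_map type_names moves move_names → Spec_create_type_moves_map type_names moves move_names (create_type_moves_map type_names moves move_names)

-- ===== LEMMAS AND PROOFS =====

-- the type of a move entry, and the name key of a move
def pvTyp (kv : String × List (String × String)) : String := (PySem.Dict.ofList kv.2).getD "type" ""

-- ---- generic stable-sort lemmas: filter commutes with Python's insertion sort ----

theorem pv_insertBy_all_before {α : Type} (before : α → α → Bool) (x : α) (zs : List α)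
    (h : ∀ z ∈ zs, before x z = true) : PySem.List.insertBy before x zs = x :: zs := by
  cases zs with
  | nil => simp [PySem.List.insertBy]
  | cons z zs => simp [PySem.List.insertBy, h z (by simp)]

theorem pv_pairwise_insertBy {α κ : Type} [LinearOrder κ] (key : α → κ) (x : α) (ys : List α)
    (h : ys.Pairwise (fun a b => key a ≤ key b)) :
    (PySem.List.insertBy (fun a b => decide (key a < key b)) x ys).Pairwise (fun a b => key a ≤ key b) := by
  induction ys with
  | nil => simp [PySem.List.insertBy]
  | cons y ys ih =>
    rw [List.pairwise_cons] at h
    by_cases hb : key x < key y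
    · simp only [PySem.List.insertBy, hb, decide_true, if_true]
      refine List.Pairwise.cons ?_ (List.Pairwise.cons h.1 h.2)
      intro z hz
      rcases List.mem_cons.mp hz with rfl | hz
      · exact le_of_lt hb
      · exact le_trans (le_of_lt hb) (h.1 z hz)
    · simp only [PySem.List.insertBy, hb, decide_false, Bool.false_eq_true, if_false]
      refine List.Pairwise.cons ?_ (ih h.2)
      intro z hz
      rcases (PySem.List.mem_insertBy _ _ _ _).mp hz with rfl | hz
      · exact le_of_not_gt hb
      · exact h.1 z hz

theorem pv_filter_insertBy {α κ : Type} [LinearOrder κ] (key : α → κ) (p : α → Bool) (x : α) (ys : List α)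
    (h : ys.Pairwise (fun a b => key a ≤ key b)) :
    (PySem.List.insertBy (fun a b => decide (key a < key b)) x ys).filter p =
      if p x then PySem.List.insertBy (fun a b => decide (key a < key b)) x (ys.filter p)
      else ys.filter p := by
  induction ys with
  | nil => cases hp : p x <;> simp [PySem.List.insertBy, List.filter, hp]
  | cons y ys ih =>
    rw [List.pairwise_cons] at h
    have hall : key x < key y → ∀ z ∈ (y :: ys).filter p, decide (key x < key z) = true := by
      intro hb z hz
      rcases List.mem_cons.mp (List.mem_of_mem_filter hz) with rfl | hz'
      · simp [hb]
      · simp [lt_of_lt_of_le hb (h.1 z hz')]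
    by_cases hb : key x < key y
    · simp only [PySem.List.insertBy, hb, decide_true, if_true]
      cases hp : p x with
      | false =>
        simp only [hp, Bool.false_eq_true, if_false, List.filter_cons, Bool.false_eq_true]
      | true =>
        rw [if_pos rfl]
        rw [pv_insertBy_all_before _ _ _ (fun z hz => hall hb z hz)]
        simp [List.filter_cons, hp]
    · simp only [PySem.List.insertBy, hb, decide_false, Bool.false_eq_true, if_false]
      rw [List.filter_cons, List.filter_cons]
      cases hpy : p y with
      | true =>
        simp only [if_true]
        rw [ih h.2]
        cases hp : p x with
        | false => simp
        | true =>
          simp only [if_true]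
          simp [PySem.List.insertBy, hb]
      | false =>
        simp only [Bool.false_eq_true, if_false]
        exact ih h.2

theorem pv_foldl_insertBy_filter {α κ : Type} [LinearOrder κ] (key : α → κ) (p : α → Bool) :
    ∀ (xs : List α) (acc : List α), acc.Pairwise (fun a b => key a ≤ key b) →
    (xs.foldl (fun a x => PySem.List.insertBy (fun a b => decide (key a < key b)) x a) acc).filter p =
      (xs.filter p).foldl (fun a x => PySem.List.insertBy (fun a b => decide (key a < key b)) x a) (acc.filter p) := by
  intro xs
  induction xs with
  | nil => intro acc _; rfl
  | cons x xs ih =>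
    intro acc hacc
    simp only [List.foldl_cons]
    rw [ih _ (pv_pairwise_insertBy key x acc hacc), pv_filter_insertBy key p x acc hacc]
    cases hp : p x with
    | true => simp [List.filter, hp]
    | false => simp [List.filter, hp]

theorem pv_sorted_filter {α κ : Type} [LinearOrder κ] (key : α → κ) (p : α → Bool) (xs : List α) :
    (PySem.List.sorted xs key false).filter p = PySem.List.sorted (xs.filter p) key false := by
  rw [PySem.List.sorted_eq_foldl_insertBy, PySem.List.sorted_eq_foldl_insertBy]
  simpa using pv_foldl_insertBy_filter key p xs [] List.Pairwise.nil

-- ---- A's first loop is a plain modify-append fold ----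

theorem pv_stepA_raw (acc : PySem.Dict String (List String)) (kv : String × List (String × String)) :
    (if acc.contains ((PySem.Dict.ofList kv.2).getD "type" "") then acc
     else acc.insert ((PySem.Dict.ofList kv.2).getD "type" "") []).modify
       ((PySem.Dict.ofList kv.2).getD "type" "") [] (· ++ [kv.1])
    = acc.modify (pvTyp kv) [] (· ++ [kv.1]) := by
  show (if acc.contains (pvTyp kv) then acc else acc.insert (pvTyp kv) []).modify
      (pvTyp kv) [] (· ++ [kv.1]) = acc.modify (pvTyp kv) [] (· ++ [kv.1])
  by_cases h : acc.contains (pvTyp kv) = true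
  · simp [h]
  · have h' : acc.contains (pvTyp kv) = false := by simpa using h
    rw [h']
    simp only [Bool.false_eq_true, if_false]
    rw [PySem.Dict.modify, PySem.Dict.modify, PySem.Dict.getD_insert_self,
        PySem.Dict.insert_insert_self, PySem.Dict.getD_of_not_contains acc [] h']

-- ---- B's first loop (setdefault) is a modify-id fold ----

theorem pv_setdefault_eq_modify_id (d : PySem.Dict String (List String)) (hnd : d.keys.Nodup) (k : String) :
    d.setdefault k [] = d.modify k [] id := by
  by_cases h : d.contains k = true
  · rw [PySem.Dict.setdefault_of_contains d [] h]
    simp only [PySem.Dict.modify, id]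
    have hs : (d.get? k).isSome = true := PySem.Dict.contains_eq_isSome_get? d k ▸ h
    rcases Option.isSome_iff_exists.mp hs with ⟨v, hv⟩
    rw [PySem.Dict.getD_of_get?_eq_some d [] hv]
    apply PySem.Dict.ext
    rw [PySem.Dict.items_insert_of_contains d v h]
    conv_lhs => rw [← List.map_id d.items]
    apply List.map_congr_left
    intro p hp
    by_cases hk : (p.1 == k) = true
    · obtain ⟨p1, p2⟩ := p
      have hk' : p1 = k := beq_iff_eq.mp hk
      subst hk'
      have hget : d.get? p1 = some p2 := PySem.Dict.get?_of_mem_items d hp hnd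
      have hpv : p2 = v := by
        rw [hget] at hv
        exact Option.some.inj hv
      simp [hpv]
    · simp [hk]
  · have h' : d.contains k = false := by simpa using h
    rw [PySem.Dict.setdefault_of_not_contains d [] h']
    simp only [PySem.Dict.modify, PySem.Dict.getD_of_not_contains d [] h', id]

theorem pv_foldlB_eq_modify (l : List (String × List (String × String))) (d : PySem.Dict String (List String))
    (hnd : d.keys.Nodup) :
    l.foldl (fun acc kv => acc.setdefault ((PySem.Dict.ofList kv.2).getD "type" "") []) d
    = l.foldl (fun acc kv => acc.modify (pvTyp kv) [] id) d := by
  induction l generalizing d with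
  | nil => rfl
  | cons kv l ih =>
    simp only [List.foldl_cons]
    rw [show d.setdefault ((PySem.Dict.ofList kv.2).getD "type" "") [] = d.modify (pvTyp kv) [] id from
      pv_setdefault_eq_modify_id d hnd (pvTyp kv)]
    exact ih _ (by
      simp only [PySem.Dict.modify]
      exact PySem.Dict.nodup_keys_insert _ _ _ hnd)

-- ---- all values of the skeleton are [] ----

theorem pv_skeleton_values_nil (l : List (String × List (String × String))) (d : PySem.Dict String (List String))
    (h : ∀ t, d.getD t [] = []) (t : String) :
    (l.foldl (fun acc kv => acc.modify (pvTyp kv) [] id) d).getD t [] = [] := by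
  induction l generalizing d with
  | nil => exact h t
  | cons kv l ih =>
    simp only [List.foldl_cons]
    apply ih
    intro t'
    rw [PySem.Dict.getD_modify]
    split <;> simp [h]

-- ---- the bucket of any modify-append grouping fold ----

theorem pv_getD_fold_append {β : Type} (key : β → String) (val : β → String) :
    ∀ (l : List β) (d : PySem.Dict String (List String)) (t : String),
    (l.foldl (fun acc x => acc.modify (key x) [] (· ++ [val x])) d).getD t []
      = d.getD t [] ++ ((l.filter (fun x => key x == t)).map val) := by
  intro l
  induction l with
  | nil => intro d t; simp
  | cons x l ih =>
    intro d t
    simp only [List.foldl_cons, List.filter_cons]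
    rw [ih]
    by_cases ht : key x == t
    · have htt : t = key x := (beq_iff_eq.mp ht).symm
      rw [ht]
      simp only [if_true, List.map_cons]
      rw [PySem.Dict.getD_modify, if_pos htt, htt, List.append_assoc, List.singleton_append]
    · have ht' : (key x == t) = false := by simpa using ht
      rw [ht']
      simp only [Bool.false_eq_true, if_false]
      rw [PySem.Dict.getD_modify, if_neg (by intro hq; rw [hq] at ht'; simp at ht')]

-- ---- A's second loop: keys unchanged, each bucket transformed ----

theorem pv_loop2_keys (g : List String → List String) :
    ∀ (ks : List String) (d : PySem.Dict String (List String)),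
    (∀ k ∈ ks, d.contains k = true) →
    (ks.foldl (fun d t => d.insert t (g (d.getD t []))) d).keys = d.keys := by
  intro ks
  induction ks with
  | nil => intro d _; rfl
  | cons k ks ih =>
    intro d h
    simp only [List.foldl_cons]
    rw [ih _ ?_, PySem.Dict.keys_insert_of_contains d _ (h k (by simp))]
    intro k' hk'
    rw [PySem.Dict.contains_insert]
    simp [h k' (by simp [hk'])]

theorem pv_loop2_getD (g : List String → List String) :
    ∀ (ks : List String) (d : PySem.Dict String (List String)) (t : String), ks.Nodup →
    (ks.foldl (fun d t => d.insert t (g (d.getD t []))) d).getD t []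
      = if t ∈ ks then g (d.getD t []) else d.getD t [] := by
  intro ks
  induction ks with
  | nil => intro d t _; simp
  | cons k ks ih =>
    intro d t hnd
    rcases List.nodup_cons.mp hnd with ⟨hk, hnd'⟩
    simp only [List.foldl_cons]
    rw [ih _ _ hnd']
    by_cases ht : t = k
    · subst ht
      simp [hk, PySem.Dict.getD_insert_self]
    · rw [PySem.Dict.getD_insert_of_ne _ _ _ ht]
      simp [ht]

-- ===== main assembly =====

theorem pv_main (type_names : List String) (moves : List (String × List (String × String))) (move_names : List (String × String)) :
    create_type_moves_map type_names moves move_names = create_type_moves_map_alt type_names moves move_names := by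
  simp only [create_type_moves_map, create_type_moves_map_alt]
  simp only [pv_stepA_raw]
  rw [pv_foldlB_eq_modify _ _ (by rw [PySem.Dict.keys_empty]; exact List.nodup_nil)]
  set md : PySem.Dict String (List (String × String)) := PySem.Dict.ofList moves with hmd
  set ms : List (String × List (String × String)) := md.items with hms
  set nmf : String → String := fun m => (PySem.Dict.ofList move_names).getD m "" with hnmf
  set typB : String → String := fun m => (PySem.Dict.ofList (md.getD m [])).getD "type" "" with htypB
  have hndms : md.keys.Nodup := PySem.Dict.nodup_keys_ofList moves
  have htyp_agree : ∀ kv ∈ ms, typB kv.1 = pvTyp kv := by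
    intro kv hkv
    have h2 : md.getD kv.1 [] = kv.2 :=
      PySem.Dict.getD_of_mem_items md (k := kv.1) (v := kv.2) (by exact hkv) hndms []
    have h3 : typB kv.1 = (PySem.Dict.ofList (md.getD kv.1 [])).getD "type" "" := rfl
    rw [h3, h2]
    rfl
  set tmm := ms.foldl (fun acc kv => acc.modify (pvTyp kv) [] (· ++ [kv.1])) PySem.Dict.empty with htmm
  set skel := ms.foldl (fun acc kv => acc.modify (pvTyp kv) [] id) PySem.Dict.empty with hskel
  have hkeysA : tmm.keys = PySem.Set.ofList (ms.map pvTyp) := by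
    rw [htmm, PySem.Dict.keys_foldl_modify_key ms pvTyp [] (fun _ kv => (· ++ [kv.1])),
      PySem.Dict.keys_empty]
    exact PySem.Set.update_empty _
  have hkeysB : skel.keys = PySem.Set.ofList (ms.map pvTyp) := by
    rw [hskel, PySem.Dict.keys_foldl_modify_key ms pvTyp [] (fun _ _ => id), PySem.Dict.keys_empty]
    exact PySem.Set.update_empty _
  have hndA : tmm.keys.Nodup := by rw [hkeysA]; exact PySem.Set.nodup_ofList _
  have hcont : ∀ k ∈ tmm.keys, tmm.contains k = true := by
    intro k hk
    rw [PySem.Dict.contains_iff_mem_keys]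
    exact hk
  have hbucketA : ∀ t, tmm.getD t [] = (ms.filter (fun kv => pvTyp kv == t)).map Prod.fst := by
    intro t
    rw [htmm, pv_getD_fold_append pvTyp Prod.fst ms PySem.Dict.empty t, PySem.Dict.getD_empty,
      List.nil_append]
  have hskelval : ∀ t, skel.getD t [] = [] := by
    intro t
    rw [hskel]
    exact pv_skeleton_values_nil ms PySem.Dict.empty (fun t => by rw [PySem.Dict.getD_empty]) t
  -- A's result
  set g : List String → List String := fun b => PySem.List.sorted b nmf false with hg
  set tmm2 := tmm.keys.foldl (fun d t => d.insert t (g (d.getD t []))) tmm with htmm2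
  have hkeys2 : tmm2.keys = tmm.keys := pv_loop2_keys g tmm.keys tmm hcont
  have hnd2 : tmm2.keys.Nodup := hkeys2 ▸ hndA
  have hitemsA : tmm2.items = tmm.keys.map (fun t => (t, g (tmm.getD t []))) := by
    rw [PySem.Dict.items_eq_map_keys tmm2 hnd2 [], hkeys2]
    apply List.map_congr_left
    intro t ht
    rw [htmm2, pv_loop2_getD g tmm.keys tmm t hndA, if_pos ht]
  -- B's result
  set ordered := PySem.List.sorted md.keys nmf false with hord
  set final := ordered.foldl (fun acc m => acc.modify (typB m) [] (· ++ [m])) skel with hfinal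
  have hmemord : ∀ m ∈ ordered, m ∈ ms.map Prod.fst := by
    intro m hm
    rw [hord, PySem.List.mem_sorted] at hm
    exact hm
  have hkeysF : final.keys = skel.keys := by
    rw [hfinal, PySem.Dict.keys_foldl_modify_key ordered typB [] (fun _ m => (· ++ [m])),
      PySem.Set.update_eq_append_filter]
    have hnil : (PySem.Set.ofList (ordered.map typB)).filter (fun y => !(PySem.Set.contains skel.keys y)) = [] := by
      rw [List.filter_eq_nil_iff]
      intro y hy
      rw [PySem.Set.mem_ofList] at hy
      rcases List.mem_map.mp hy with ⟨m, hm, rfl⟩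
      rcases List.mem_map.mp (hmemord m hm) with ⟨kv, hkv, rfl⟩
      have hmem : typB kv.1 ∈ skel.keys := by
        rw [hkeysB, PySem.Set.mem_ofList, htyp_agree kv hkv]
        exact List.mem_map.mpr ⟨kv, hkv, rfl⟩
      simp [PySem.Set.contains, hmem]
    rw [hnil, List.append_nil]
  have hndF : final.keys.Nodup := by
    rw [hkeysF, hkeysB]
    exact PySem.Set.nodup_ofList _
  have hbucketF : ∀ t, final.getD t [] = ordered.filter (fun m => typB m == t) := by
    intro t
    rw [hfinal, pv_getD_fold_append typB (fun m => m) ordered skel t, hskelval t, List.nil_append,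
      List.map_id_fun', id]
  have hitemsB : final.items = skel.keys.map (fun t => (t, ordered.filter (fun m => typB m == t))) := by
    rw [PySem.Dict.items_eq_map_keys final hndF [], hkeysF]
    apply List.map_congr_left
    intro t _
    rw [hbucketF t]
  -- buckets agree: one global stable sort = per-bucket sorts
  have hbuckets : ∀ t, g (tmm.getD t []) = ordered.filter (fun m => typB m == t) := by
    intro t
    rw [hbucketA t]
    have h1 : (ms.filter (fun kv => pvTyp kv == t)).map Prod.fst
        = (ms.map Prod.fst).filter (fun m => typB m == t) := by
      rw [List.filter_map]
      apply congrArg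
      apply List.filter_congr
      intro kv hkv
      simp [Function.comp, htyp_agree kv hkv]
    have hkeyseq : md.keys = ms.map Prod.fst := rfl
    rw [h1, hg, hord, hkeyseq, pv_sorted_filter nmf (fun m => typB m == t) (ms.map Prod.fst)]
  rw [hitemsA, hitemsB, hkeysA, hkeysB]
  apply List.map_congr_left
  intro t _
  rw [hbuckets t]

-- ===== VERDICT (by name: the statement is the Claim_ definition above) =====
theorem create_type_moves_map_spec : Claim_equal_create_type_moves_map := by
  intro type_names moves move_names _ _
  unfold Spec_create_type_moves_map
  exact pv_main type_names moves move_names
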